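-- pv_equiv track=rewrite | github.com/pypi-data/pypi-mirror-279 | packages/p-vs-np-library/p_vs_np_library-0.1-py3-none-any.whl/p_vs_np/database_problems/job_shop-scheduling.py | list_scheduling
-- ===== SOURCE A (Python) =====
-- def list_scheduling(jobs, machines):
--     num_jobs = len(jobs)
--     num_machines = len(machines)
--
--     schedule = [[] for _ in range(num_machines)]
--     completion_times = [0] * num_machines
--
--     remaining_operations = [len(job) for job in jobs]
--
--     while sum(remaining_operations) > 0:
--         for job_id, job in enumerate(jobs):
--             if remaining_operations[job_id] > 0:
--                 next_operation = job[len(job) - remaining_operations[job_id]]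
--                 machine_id = next_operation[0]
--                 processing_time = next_operation[1]
--
--                 start_time = max(completion_times[machine_id], completion_times[1 - machine_id])
--                 completion_time = start_time + processing_time
--
--                 schedule[machine_id].append((job_id, start_time, completion_time))
--                 completion_times[machine_id] = completion_time
--
--                 remaining_operations[job_id] -= 1
--
--     makespan = max(completion_times)
--
--     return schedule, makespan
-- ===== SOURCE B (Python) =====
-- def list_scheduling(jobs, machines):
--     num_machines = len(machines)
--
--     # stage 1: distribute every operation into a bucket for its round (counting-sort style),
--     # then flatten the buckets into one round-major timeline of (job_id, operation) items
--     rounds = max((len(job) for job in jobs), default=0)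
--     buckets = [[] for _ in range(rounds)]
--     for job_id, job in enumerate(jobs):
--         for r in range(len(job)):
--             buckets[r].append((job_id, job[r]))
--     order = [item for bucket in buckets for item in bucket]
--
--     # stage 2: one linear pass over the timeline, recording events (machine, triple)
--     completion_times = [0] * num_machines
--     events = []
--     for job_id, (machine_id, processing_time) in order:
--         start_time = max(completion_times[machine_id], completion_times[1 - machine_id])
--         completion_time = start_time + processing_time
--         events.append((machine_id, (job_id, start_time, completion_time)))
--         completion_times[machine_id] = completion_time
--
--     # stage 3: partition the event list into per-machine schedules
--     schedule = [[] for _ in range(num_machines)]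
--     for machine_id, triple in events:
--         schedule[machine_id].append(triple)
--
--     return schedule, max(completion_times)
-- ===== Notes on version B (the rewrite author's own statement) =====
-- stated objective: alternative
-- what changed: A's while-loop repeatedly re-sums remaining-operation counters and scans every job per round appending into per-machine lists; B instead bucket-distributes all operations by round in one pass over the jobs (counting-sort style), flattens the buckets into one round-major timeline, computes the event list in a single linear pass, and only at the end partitions events into per-machine schedules.
import Mathlib
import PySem

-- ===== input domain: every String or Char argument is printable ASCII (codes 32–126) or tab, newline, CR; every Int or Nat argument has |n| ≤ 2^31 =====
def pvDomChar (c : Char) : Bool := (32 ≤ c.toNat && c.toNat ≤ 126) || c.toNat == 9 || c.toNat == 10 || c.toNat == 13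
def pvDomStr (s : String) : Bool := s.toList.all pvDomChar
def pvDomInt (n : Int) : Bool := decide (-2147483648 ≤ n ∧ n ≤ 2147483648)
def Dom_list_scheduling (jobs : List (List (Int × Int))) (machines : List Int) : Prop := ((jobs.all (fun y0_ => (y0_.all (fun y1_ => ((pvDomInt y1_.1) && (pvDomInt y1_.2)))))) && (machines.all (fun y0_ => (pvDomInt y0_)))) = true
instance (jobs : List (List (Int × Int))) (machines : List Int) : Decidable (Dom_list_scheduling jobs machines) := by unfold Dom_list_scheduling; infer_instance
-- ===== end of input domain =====

-- B replaces A's counter-driven while loop (which re-sums the counters and re-scans every job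
-- each round, appending into per-machine lists as it goes) by three staged passes: bucket the
-- operations by round, run one linear pass over the flattened timeline producing an event list,
-- then partition the events into per-machine schedules; equivalence of the RETURN value is
-- proved (neither program mutates its arguments).

-- ===== PORT A =====
-- The scheduling state: (schedule, completion_times).
abbrev PvState := List (List (Int × Int × Int)) × List Int

-- A's loop body:
--   start = max(ct[m], ct[1-m]); c = start + p; schedule[m].append((j, start, c)); ct[m] = c
def doOp (sched : List (List (Int × Int × Int))) (comp : List Int) (jobId : Int)
    (op : Int × Int) : PvState :=
  let m := op.1
  let s := max (PySem.List.pyGetD comp m 0) (PySem.List.pyGetD comp (1 - m) 0)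
  let c := s + op.2
  (PySem.List.pySetD sched m (PySem.List.pyGetD sched m [] ++ [(jobId, s, c)]),
   PySem.List.pySetD comp m c)

-- the 'for job_id, job in enumerate(jobs)' body of A; remaining_operations is index-aligned
-- with jobs (same length, job_id = position), so the paired structural recursion is exact
def innerA : Int → List (List (Int × Int)) → List Int → PvState → PvState × List Int
  | _, [], rem, S => (S, rem)
  | _, _ :: _, [], S => (S, [])
  | jobId, job :: jobsT, r :: remT, S =>
    if 0 < r then
      let op := (PySem.List.pyGet? job ((job.length : Int) - r)).getD (0, 0)
      let res := innerA (jobId + 1) jobsT remT (doOp S.1 S.2 jobId op)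
      (res.1, (r - 1) :: res.2)
    else
      let res := innerA (jobId + 1) jobsT remT S
      (res.1, r :: res.2)

-- 'while sum(remaining_operations) > 0'; fuel = the initial sum, which bounds the number of
-- iterations (each iteration with a positive sum strictly decreases it)
def whileA (jobs : List (List (Int × Int))) : Nat → PvState → List Int → PvState
  | 0, S, _ => S
  | fuel + 1, S, rem =>
    if 0 < rem.sum then
      let res := innerA 0 jobs rem S
      whileA jobs fuel res.1 res.2
    else S

def list_scheduling (jobs : List (List (Int × Int))) (machines : List Int) :
    (List (List (Int × Int × Int))) × Int :=
  let numMachines := machines.length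
  let schedule : List (List (Int × Int × Int)) := (List.range numMachines).map (fun _ => [])
  let completionTimes : List Int := List.replicate numMachines 0
  let rem : List Int := jobs.map (fun job => (job.length : Int))
  let S := whileA jobs rem.sum.toNat (schedule, completionTimes) rem
  (S.1, (PySem.List.max? S.2 (fun x => x)).getD 0)   -- max(completion_times); Pre_ gives machines ≠ []

-- ===== PORT B =====
-- stage 1 inner loops: 'for r in range(len(job)): buckets[r].append((job_id, job[r]))'
def bucketJob (B : List (List (Int × Int × Int))) (p : Int × List (Int × Int)) :
    List (List (Int × Int × Int)) :=
  (PySem.List.pyRange 0 (p.2.length : Int) 1).foldl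
    (fun B r => PySem.List.pySetD B r
      (PySem.List.pyGetD B r [] ++
        [(p.1, ((PySem.List.pyGet? p.2 r).getD (0, 0)).1, ((PySem.List.pyGet? p.2 r).getD (0, 0)).2)])) B

-- stage 2 body: compute (start, completion), record the event, update completion_times
def evStep (acc : List Int × List (Int × Int × Int × Int)) (item : Int × Int × Int) :
    List Int × List (Int × Int × Int × Int) :=
  let m := item.2.1
  let s := max (PySem.List.pyGetD acc.1 m 0) (PySem.List.pyGetD acc.1 (1 - m) 0)
  let c := s + item.2.2
  (PySem.List.pySetD acc.1 m c, acc.2 ++ [(m, item.1, s, c)])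

-- stage 3 body: 'schedule[machine_id].append(triple)'
def appendEv (sched : List (List (Int × Int × Int))) (e : Int × Int × Int × Int) :
    List (List (Int × Int × Int)) :=
  PySem.List.pySetD sched e.1 (PySem.List.pyGetD sched e.1 [] ++ [e.2])

def list_scheduling_alt (jobs : List (List (Int × Int))) (machines : List Int) :
    (List (List (Int × Int × Int))) × Int :=
  let numMachines := machines.length
  -- stage 1: bucket all operations by their round, then flatten round-major
  let rounds := (PySem.List.max? (jobs.map (fun job => (job.length : Int))) (fun x => x)).getD 0
  let buckets0 : List (List (Int × Int × Int)) := (PySem.List.pyRange 0 rounds 1).map (fun _ => [])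
  let buckets := (PySem.List.enumerate jobs 0).foldl bucketJob buckets0
  let order := buckets.flatten
  -- stage 2: one linear pass over the timeline, producing the event list
  let ct0 : List Int := List.replicate numMachines 0
  let fin := order.foldl evStep (ct0, [])
  -- stage 3: partition the events into per-machine schedules
  let schedule0 : List (List (Int × Int × Int)) := (List.range numMachines).map (fun _ => [])
  let schedule := fin.2.foldl appendEv schedule0
  (schedule, (PySem.List.max? fin.1 (fun x => x)).getD 0)

-- ===== PRECONDITION & SPEC =====
-- Pre_ excludes exactly the inputs where the Python A raises: machines == [] (ValueError on
-- max, or IndexError as soon as an operation runs) and any operation whose machine_id m or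
-- 1 - m is not a valid Python index into completion_times (IndexError).
def Pre_list_scheduling (jobs : List (List (Int × Int))) (machines : List Int) : Prop :=
  machines ≠ [] ∧ ∀ job ∈ jobs, ∀ op ∈ job,
    PySem.Raise.InRange machines.length op.1 ∧ PySem.Raise.InRange machines.length (1 - op.1)
instance (jobs : List (List (Int × Int))) (machines : List Int) :
    Decidable (Pre_list_scheduling jobs machines) := by unfold Pre_list_scheduling; infer_instance

def pvWitness_list_scheduling : (List (List (Int × Int))) × List Int :=
  ([[(0, 2), (1, 3)], [(1, 2)]], [0, 0])

def Spec_list_scheduling (jobs : List (List (Int × Int))) (machines : List Int) (out : (List (List (Int × Int × Int))) × Int) : Prop := out = list_scheduling_alt jobs machines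
instance (jobs : List (List (Int × Int))) (machines : List Int) (out : (List (List (Int × Int × Int))) × Int) : Decidable (Spec_list_scheduling jobs machines out) := by unfold Spec_list_scheduling; infer_instance

-- ===== CLAIM (what is proved, stated in full; the proofs are below) =====
def Claim_equal_list_scheduling : Prop := ∀ (jobs : List (List (Int × Int))) (machines : List Int), Dom_list_scheduling jobs machines → Pre_list_scheduling jobs machines → Spec_list_scheduling jobs machines (list_scheduling jobs machines)

-- ===== LEMMAS AND PROOFS =====

-- remaining_operations after k rounds of A's while loop
def remL (jobs : List (List (Int × Int))) (k : Nat) : List Int :=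
  jobs.map (fun job => ((job.length - k : Nat) : Int))

-- the jobs still active in round k, with their indices
def actL (jobs : List (List (Int × Int))) (k : Nat) : List (Int × List (Int × Int)) :=
  (PySem.List.enumerate jobs 0).filter (fun p => decide (k < p.2.length))

-- the timeline item job p contributes in round k
def evOf (p : Int × List (Int × Int)) (k : Nat) : Int × Int × Int :=
  (p.1, ((PySem.List.pyGet? p.2 (k : Int)).getD (0, 0)).1,
        ((PySem.List.pyGet? p.2 (k : Int)).getD (0, 0)).2)

-- the round-k slice of the timeline
def rowL (jobs : List (List (Int × Int))) (k : Nat) : List (Int × Int × Int) :=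
  (actL jobs k).map (fun p => evOf p k)

-- the timeline from round k on (fuel = number of rounds left)
def flatFrom (jobs : List (List (Int × Int))) : Nat → Nat → List (Int × Int × Int)
  | 0, _ => []
  | n + 1, k => rowL jobs k ++ flatFrom jobs n (k + 1)

-- one timeline item applied to the paired state
def opFlat (S : PvState) (e : Int × Int × Int) : PvState := doOp S.1 S.2 e.1 e.2

-- the completion-times vector after a run of timeline items
def ctA : List Int → List (Int × Int × Int) → List Int
  | ct, [] => ct
  | ct, e :: t =>
    ctA (PySem.List.pySetD ct e.2.1
          (max (PySem.List.pyGetD ct e.2.1 0) (PySem.List.pyGetD ct (1 - e.2.1) 0) + e.2.2)) t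

-- the events a run of timeline items produces
def evsA : List Int → List (Int × Int × Int) → List (Int × Int × Int × Int)
  | _, [] => []
  | ct, e :: t =>
    let s := max (PySem.List.pyGetD ct e.2.1 0) (PySem.List.pyGetD ct (1 - e.2.1) 0)
    (e.2.1, e.1, s, s + e.2.2) :: evsA (PySem.List.pySetD ct e.2.1 (s + e.2.2)) t

-- the number of rounds
def Rn (jobs : List (List (Int × Int))) : Nat :=
  jobs.foldl (fun acc job => max acc job.length) 0

theorem innerA_eq (jobs : List (List (Int × Int))) (k : Nat) :
    ∀ (j0 : Int) (S : PvState),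
    innerA j0 jobs (remL jobs k) S
      = ((((PySem.List.enumerate jobs j0).filter (fun p => decide (k < p.2.length))).map
            (fun p => evOf p k)).foldl opFlat S,
         remL jobs (k + 1)) := by
  induction jobs with
  | nil =>
    intro j0 S
    simp [innerA, remL, PySem.List.enumerate_nil]
  | cons job jobsT ih =>
    intro j0 S
    have hrem : remL (job :: jobsT) k = ((job.length - k : Nat) : Int) :: remL jobsT k := rfl
    rw [hrem]
    by_cases h : k < job.length
    · have h0 : (0 : Int) < ((job.length - k : Nat) : Int) := by omega
      have hidx : (job.length : Int) - ((job.length - k : Nat) : Int) = (k : Int) := by omega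
      have hr : ((job.length - k : Nat) : Int) - 1 = ((job.length - (k + 1) : Nat) : Int) := by
        omega
      simp only [innerA, if_pos h0, hidx, ih, PySem.List.enumerate_cons,
        List.filter_cons, decide_eq_true_eq, h, if_pos, List.map_cons, List.foldl_cons, hr]
      rfl
    · have h0 : ¬ (0 : Int) < ((job.length - k : Nat) : Int) := by omega
      have hr : ((job.length - k : Nat) : Int) = ((job.length - (k + 1) : Nat) : Int) := by
        omega
      simp only [innerA, if_neg h0, ih, PySem.List.enumerate_cons,
        List.filter_cons, decide_eq_true_eq, h, if_false]
      rw [hr]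
      rfl

theorem remL_sum_nonneg (jobs : List (List (Int × Int))) (k : Nat) :
    0 ≤ (remL jobs k).sum := by
  induction jobs with
  | nil => simp [remL]
  | cons job jobsT ih =>
    have : remL (job :: jobsT) k = ((job.length - k : Nat) : Int) :: remL jobsT k := rfl
    rw [this, List.sum_cons]
    have : (0 : Int) ≤ ((job.length - k : Nat) : Int) := by omega
    omega

theorem remL_sum_mono (jobs : List (List (Int × Int))) (k : Nat) :
    (remL jobs (k + 1)).sum ≤ (remL jobs k).sum := by
  induction jobs with
  | nil => simp [remL]
  | cons job jobsT ih =>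
    have e1 : remL (job :: jobsT) k = ((job.length - k : Nat) : Int) :: remL jobsT k := rfl
    have e2 : remL (job :: jobsT) (k + 1)
        = ((job.length - (k + 1) : Nat) : Int) :: remL jobsT (k + 1) := rfl
    rw [e1, e2, List.sum_cons, List.sum_cons]
    have : ((job.length - (k + 1) : Nat) : Int) ≤ ((job.length - k : Nat) : Int) := by omega
    omega

theorem remL_sum_dec (jobs : List (List (Int × Int))) (k : Nat)
    (h : 0 < (remL jobs k).sum) : (remL jobs (k + 1)).sum < (remL jobs k).sum := by
  induction jobs with
  | nil => simp [remL] at h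
  | cons job jobsT ih =>
    have e1 : remL (job :: jobsT) k = ((job.length - k : Nat) : Int) :: remL jobsT k := rfl
    have e2 : remL (job :: jobsT) (k + 1)
        = ((job.length - (k + 1) : Nat) : Int) :: remL jobsT (k + 1) := rfl
    rw [e1, e2, List.sum_cons, List.sum_cons]
    rw [e1, List.sum_cons] at h
    by_cases hc : k < job.length
    · have h1 : ((job.length - (k + 1) : Nat) : Int) < ((job.length - k : Nat) : Int) := by
        omega
      have h2 := remL_sum_mono jobsT k
      omega
    · have h1 : ((job.length - k : Nat) : Int) = 0 := by omega
      have h2 : ((job.length - (k + 1) : Nat) : Int) = 0 := by omega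
      have h3 : 0 < (remL jobsT k).sum := by omega
      have := ih h3
      omega

theorem le_Rn (jobs : List (List (Int × Int))) : ∀ job ∈ jobs, job.length ≤ Rn jobs := by
  have h := PySem.List.le_foldl_max_nat jobs (fun job => job.length) 0
  exact fun job hj => h.2 job hj

theorem remL_all_le (jobs : List (List (Int × Int))) (k : Nat)
    (h : (remL jobs k).sum ≤ 0) : ∀ job ∈ jobs, job.length ≤ k := by
  induction jobs with
  | nil => simp
  | cons job jobsT ih =>
    have e1 : remL (job :: jobsT) k = ((job.length - k : Nat) : Int) :: remL jobsT k := rfl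
    rw [e1, List.sum_cons] at h
    have hn := remL_sum_nonneg jobsT k
    have hh : (0 : Int) ≤ ((job.length - k : Nat) : Int) := by omega
    intro j hj
    rcases List.mem_cons.1 hj with rfl | hj
    · omega
    · exact ih (by omega) j hj

theorem Rn_le (jobs : List (List (Int × Int))) (k : Nat)
    (h : (remL jobs k).sum ≤ 0) : Rn jobs ≤ k := by
  have hall := remL_all_le jobs k h
  have : ∀ (l : List (List (Int × Int))) (a : Nat), a ≤ k → (∀ job ∈ l, job.length ≤ k) →
      l.foldl (fun acc job => max acc job.length) a ≤ k := by
    intro l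
    induction l with
    | nil => intro a ha _; simpa using ha
    | cons x t iht =>
      intro a ha hl
      simp only [List.foldl_cons]
      exact iht (max a x.length) (by
        have := hl x (List.mem_cons_self); omega)
        (fun job hj => hl job (List.mem_cons_of_mem x hj))
  exact this jobs 0 (Nat.zero_le k) hall

theorem remL_exists (jobs : List (List (Int × Int))) (k : Nat)
    (h : 0 < (remL jobs k).sum) : ∃ job ∈ jobs, k < job.length := by
  induction jobs with
  | nil => simp [remL] at h
  | cons job jobsT ih =>
    have e1 : remL (job :: jobsT) k = ((job.length - k : Nat) : Int) :: remL jobsT k := rfl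
    rw [e1, List.sum_cons] at h
    by_cases hc : k < job.length
    · exact ⟨job, List.mem_cons_self, hc⟩
    · have h1 : ((job.length - k : Nat) : Int) = 0 := by omega
      obtain ⟨j, hj, hlen⟩ := ih (by omega)
      exact ⟨j, List.mem_cons_of_mem job hj, hlen⟩

theorem Rn_pos (jobs : List (List (Int × Int))) (k : Nat)
    (h : 0 < (remL jobs k).sum) : k < Rn jobs := by
  obtain ⟨job, hj, hlen⟩ := remL_exists jobs k h
  have := le_Rn jobs job hj
  omega

-- A's while loop runs the flat round-major timeline
theorem main_loop (jobs : List (List (Int × Int))) : ∀ (fuel : Nat) (k : Nat) (S : PvState),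
    (remL jobs k).sum ≤ (fuel : Int) →
    whileA jobs fuel S (remL jobs k) = (flatFrom jobs (Rn jobs - k) k).foldl opFlat S := by
  intro fuel
  induction fuel with
  | zero =>
    intro k S hf
    have h0 : (remL jobs k).sum ≤ 0 := by exact_mod_cast hf
    have : Rn jobs - k = 0 := by have := Rn_le jobs k h0; omega
    simp [whileA, this, flatFrom]
  | succ fuel ih =>
    intro k S hf
    by_cases h : 0 < (remL jobs k).sum
    · have hk := Rn_pos jobs k h
      have hd : Rn jobs - k = (Rn jobs - (k + 1)) + 1 := by omega
      rw [whileA, if_pos h, innerA_eq jobs k 0 S]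
      have hdec := remL_sum_dec jobs k h
      have hrec : (remL jobs (k + 1)).sum ≤ (fuel : Int) := by
        push_cast at hf ⊢; omega
      rw [ih (k + 1) _ hrec, hd]
      show (flatFrom jobs (Rn jobs - (k+1)) (k+1)).foldl opFlat ((rowL jobs k).foldl opFlat S)
        = (rowL jobs k ++ flatFrom jobs (Rn jobs - (k+1)) (k+1)).foldl opFlat S
      rw [List.foldl_append]
    · have h0 : (remL jobs k).sum ≤ 0 := by omega
      have : Rn jobs - k = 0 := by have := Rn_le jobs k h0; omega
      rw [whileA, if_neg h]
      simp [this, flatFrom]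

-- stage 2 of B records exactly the events of the timeline and ends with its ct vector
theorem foldl_evStep (ops : List (Int × Int × Int)) :
    ∀ (ct : List Int) (evs : List (Int × Int × Int × Int)),
    ops.foldl evStep (ct, evs) = (ctA ct ops, evs ++ evsA ct ops) := by
  induction ops with
  | nil => intro ct evs; simp [ctA, evsA]
  | cons e t ih =>
    intro ct evs
    simp only [List.foldl_cons, evStep, ih, ctA, evsA, List.append_assoc, List.singleton_append]

-- A's paired fold is: append the events into the schedule, and run the ct vector
theorem foldl_opFlat (ops : List (Int × Int × Int)) :
    ∀ (sched : List (List (Int × Int × Int))) (ct : List Int),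
    ops.foldl opFlat (sched, ct) = ((evsA ct ops).foldl appendEv sched, ctA ct ops) := by
  induction ops with
  | nil => intro sched ct; simp [ctA, evsA]
  | cons e t ih =>
    intro sched ct
    simp only [List.foldl_cons, evsA, ctA]
    rw [← ih]
    rfl

-- stage-1 inner loop: appending job p's operations into the buckets, one per round
theorem bucketJob_spec (p : Int × List (Int × Int)) :
    ∀ (n : Nat) (B : List (List (Int × Int × Int))), n ≤ B.length →
    ((List.range n).foldl
      (fun B (r : Nat) => PySem.List.pySetD B (r : Int)
        (PySem.List.pyGetD B (r : Int) [] ++ [evOf p r])) B).length = B.length ∧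
    ∀ r, r < B.length →
    ((List.range n).foldl
      (fun B (r : Nat) => PySem.List.pySetD B (r : Int)
        (PySem.List.pyGetD B (r : Int) [] ++ [evOf p r])) B).getD r []
      = B.getD r [] ++ (if r < n then [evOf p r] else []) := by
  intro n
  induction n with
  | zero => intro B hB; simp
  | succ n ih =>
    intro B hB
    obtain ⟨ihlen, ihget⟩ := ih B (by omega)
    rw [List.range_succ, List.foldl_append, List.foldl_cons, List.foldl_nil]
    set F := (List.range n).foldl
      (fun B (r : Nat) => PySem.List.pySetD B (r : Int)
        (PySem.List.pyGetD B (r : Int) [] ++ [evOf p r])) B with hF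
    have hn : n < F.length := by omega
    rw [PySem.List.pySetD_natCast, PySem.List.pyGetD_natCast]
    refine ⟨by simpa using ihlen, fun r hr => ?_⟩
    have hrF : r < F.length := by omega
    by_cases hrn : r = n
    · subst hrn
      rw [List.getD_eq_getElem _ _ (by simpa using hrF), List.getElem_set_self, ihget r hr]
      have h2 : r < r + 1 := by omega
      simp [h2]
    · rw [List.getD_eq_getElem _ _ (by simpa using hrF), List.getElem_set_ne (by omega),
        ← List.getD_eq_getElem F [] hrF, ihget r hr]
      by_cases h1 : r < n
      · have h2 : r < n + 1 := by omega
        simp [h1, h2]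
      · have h2 : ¬ r < n + 1 := by omega
        simp [h1, h2]

-- the port's bucketJob in terms of the Nat-range fold above
theorem bucketJob_eq (p : Int × List (Int × Int)) (B : List (List (Int × Int × Int))) :
    bucketJob B p = (List.range p.2.length).foldl
      (fun B (r : Nat) => PySem.List.pySetD B (r : Int)
        (PySem.List.pyGetD B (r : Int) [] ++ [evOf p r])) B := by
  unfold bucketJob
  rw [PySem.List.pyRange_zero_nat, List.foldl_map]
  rfl

-- stage-1 outer loop: the buckets collect, per round, exactly the active jobs' items
theorem distribute_spec (len0 : Nat) :
    ∀ (l : List (Int × List (Int × Int))) (B : List (List (Int × Int × Int))),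
    B.length = len0 → (∀ p ∈ l, p.2.length ≤ len0) →
    (l.foldl bucketJob B).length = len0 ∧
    ∀ r, r < len0 →
    (l.foldl bucketJob B).getD r []
      = B.getD r [] ++ (l.filter (fun p => decide (r < p.2.length))).map (fun p => evOf p r) := by
  intro l
  induction l with
  | nil => intro B hB _; simp [hB]
  | cons p t ih =>
    intro B hB hl
    rw [List.foldl_cons]
    have hp : p.2.length ≤ B.length := by rw [hB]; exact hl p (List.mem_cons_self)
    obtain ⟨blen, bget⟩ := bucketJob_spec p p.2.length B hp
    rw [← bucketJob_eq] at blen bget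
    obtain ⟨ilen, iget⟩ := ih (bucketJob B p) (by omega)
      (fun q hq => hl q (List.mem_cons_of_mem p hq))
    refine ⟨ilen, fun r hr => ?_⟩
    rw [iget r hr, bget r (by omega), List.filter_cons]
    by_cases hc : r < p.2.length
    · simp [hc]
    · simp [hc]

-- flattening a bucket list whose r-th entry is rowL (k+r) gives the timeline from k
theorem flatten_eq (jobs : List (List (Int × Int))) :
    ∀ (n : Nat) (k : Nat) (B : List (List (Int × Int × Int))), B.length = n →
    (∀ i, i < n → B.getD i [] = rowL jobs (k + i)) →
    B.flatten = flatFrom jobs n k := by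
  intro n
  induction n with
  | zero => intro k B hB _; simp [List.length_eq_zero_iff.mp hB, flatFrom]
  | succ n ih =>
    intro k B hB hget
    cases B with
    | nil => simp at hB
    | cons b B' =>
      have hb : b = rowL jobs k := by
        have := hget 0 (by omega); simpa using this
      have hB' : B'.length = n := by simpa using hB
      have hget' : ∀ i, i < n → B'.getD i [] = rowL jobs (k + 1 + i) := by
        intro i hi
        have := hget (i + 1) (by omega)
        simpa [Nat.add_assoc, Nat.add_comm 1 i] using this
      rw [List.flatten_cons, hb, ih (k + 1) B' hB' hget']
      rfl

-- getD of a constant-[] list is []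
theorem getD_map_nilconst {α β : Type} (l : List β) (i : Nat) :
    (l.map (fun _ => ([] : List α))).getD i [] = [] := by
  induction l generalizing i with
  | nil => simp
  | cons x t ih =>
    cases i with
    | zero => simp
    | succ i => exact ih i

-- B's 'rounds' (max with default 0 over the lengths) is Rn, as an Int
theorem rounds_eq (jobs : List (List (Int × Int))) :
    (PySem.List.max? (remL jobs 0) (fun x => x)).getD 0 = ((Rn jobs : Nat) : Int) := by
  have hrem : remL jobs 0 = jobs.map (fun job => (job.length : Int)) := by
    unfold remL; simp
  rw [hrem]
  have cast_fold : ∀ (l : List (List (Int × Int))) (a : Nat),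
      (l.map (fun job => (job.length : Int))).foldl max (a : Int)
        = ((l.foldl (fun acc job => max acc job.length) a : Nat) : Int) := by
    intro l
    induction l with
    | nil => intro a; simp
    | cons x t iht =>
      intro a
      simp only [List.map_cons, List.foldl_cons]
      rw [← Nat.cast_max, iht]
  cases jobs with
  | nil => simp [Rn, PySem.List.max?]
  | cons job t =>
    rw [List.map_cons, PySem.List.max?_id_cons, Option.getD_some]
    have hR : Rn (job :: t) = t.foldl (fun acc job => max acc job.length) job.length := by
      simp [Rn]
    rw [hR, ← cast_fold t job.length]

-- ===== VERDICT (by name: the statement is the Claim_ definition above) =====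
theorem list_scheduling_spec : Claim_equal_list_scheduling := by
  intro jobs machines _hD _hP
  unfold Spec_list_scheduling
  simp only [list_scheduling, list_scheduling_alt]
  -- A side: while loop = fold of the flat timeline
  have e : jobs.map (fun job => (job.length : Int)) = remL jobs 0 := by
    unfold remL; simp
  rw [e]
  have hf : (remL jobs 0).sum ≤ (((remL jobs 0).sum.toNat : Nat) : Int) := by
    have := remL_sum_nonneg jobs 0; omega
  rw [main_loop jobs (remL jobs 0).sum.toNat 0 _ hf]
  simp only [Nat.sub_zero]
  -- B side: buckets flatten to the same flat timeline
  rw [rounds_eq]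
  have hlen0 : ((PySem.List.pyRange 0 ((Rn jobs : Nat) : Int) 1).map
      (fun _ => ([] : List (Int × Int × Int)))).length = Rn jobs := by
    rw [List.length_map, PySem.List.length_pyRange_one]
    omega
  obtain ⟨dlen, dget⟩ := distribute_spec (Rn jobs) (PySem.List.enumerate jobs 0)
    ((PySem.List.pyRange 0 ((Rn jobs : Nat) : Int) 1).map (fun _ => []))
    hlen0
    (by
      intro p hp
      rw [PySem.List.mem_enumerate_iff] at hp
      obtain ⟨k, hk, rfl⟩ := hp
      exact le_Rn jobs _ (List.getElem_mem hk))
  have horder : ((PySem.List.enumerate jobs 0).foldl bucketJob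
      ((PySem.List.pyRange 0 ((Rn jobs : Nat) : Int) 1).map (fun _ => []))).flatten
        = flatFrom jobs (Rn jobs) 0 := by
    apply flatten_eq jobs (Rn jobs) 0 _ dlen
    intro i hi
    rw [dget i hi, getD_map_nilconst, List.nil_append, Nat.zero_add]
    rfl
  rw [horder]
  -- both sides reduce to the events decomposition of the same fold
  rw [foldl_evStep, foldl_opFlat]
  simp
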